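-- pv_equiv track=rewrite | github.com/Pocsek/mini-dbms | server_side/dbmanager.py | concatenate_repeating
-- ===== SOURCE A (Python) =====
-- def concatenate_repeating(kv_pairs: list[tuple[str, str]]) -> list[tuple[str, str]]:
--     """
--     Concatenate values of repeating keys.
--     """
--     kv_pairs.sort()
--     new_pairs: list[tuple[str, str]] = []
--     i = 0
--     length = len(kv_pairs)
--     while i < length:
--         key, value = kv_pairs[i]
--         i += 1
--         same_key_values: list[str] = [value]
--         while i < length:
--             n_key, n_value = kv_pairs[i]
--             if key == n_key:  # if the keys match
--                 same_key_values.append(n_value)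
--                 i += 1
--             else:
--                 break
--         new_pairs.append((key, '#'.join(same_key_values)))
--     return new_pairs
-- ===== SOURCE B (Python) =====
-- def concatenate_repeating(kv_pairs: list[tuple[str, str]]) -> list[tuple[str, str]]:
--     """
--     Concatenate values of repeating keys.
--     """
--     kv_pairs.sort()
--     groups: dict[str, list[str]] = {}
--     for key, value in kv_pairs:
--         groups.setdefault(key, []).append(value)
--     return [(key, '#'.join(values)) for key, values in groups.items()]
-- ===== Notes on version B (the rewrite author's own statement) =====
-- stated objective: simpler
-- what changed: Replaced A's nested while-loops with manual index bookkeeping and run detection by a single pass that groups values into a dict (setdefault/append) after the same in-place sort, then joins each group; dict insertion order reproduces the sorted-key output order.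
import Mathlib
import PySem

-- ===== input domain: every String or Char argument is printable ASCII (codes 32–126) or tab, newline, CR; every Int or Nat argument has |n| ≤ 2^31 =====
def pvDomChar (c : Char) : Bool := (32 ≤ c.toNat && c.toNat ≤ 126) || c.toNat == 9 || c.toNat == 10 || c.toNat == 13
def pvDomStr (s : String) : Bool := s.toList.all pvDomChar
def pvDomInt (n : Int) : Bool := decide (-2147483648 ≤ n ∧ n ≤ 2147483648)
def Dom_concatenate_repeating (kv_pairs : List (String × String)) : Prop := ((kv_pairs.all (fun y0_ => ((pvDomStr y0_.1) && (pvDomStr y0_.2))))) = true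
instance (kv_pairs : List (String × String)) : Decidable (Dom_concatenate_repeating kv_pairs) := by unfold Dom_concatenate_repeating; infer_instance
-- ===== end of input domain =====

-- B replaces A's nested run-detection loops by one dict-grouping pass (simpler); both
-- programs sort kv_pairs in place (same side effect) — the equivalence proved is about the
-- return value.

-- ===== PORT A =====
-- A's inner `while` loop: collect values while the next key equals `key`, stop at the first
-- mismatch; returns (collected values, remaining pairs).
def aTakeRun (key : String) : List (String × String) → List String × List (String × String)
  | [] => ([], [])
  | (nk, nv) :: rest =>
    if key == nk then
      (nv :: (aTakeRun key rest).1, (aTakeRun key rest).2)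
    else ([], (nk, nv) :: rest)

-- needed by aGroup's termination argument
lemma aTakeRun_len (key : String) : ∀ (l : List (String × String)),
    (aTakeRun key l).2.length ≤ l.length := by
  intro l
  induction l with
  | nil => simp [aTakeRun]
  | cons p rest ih =>
    obtain ⟨pk, pv⟩ := p
    simp only [aTakeRun]
    split
    · simpa using Nat.le_succ_of_le ih
    · simp

-- A's outer `while` loop over the sorted list
def aGroup : List (String × String) → List (String × String)
  | [] => []
  | (key, value) :: rest =>
    (key, PySem.Str.join "#" (value :: (aTakeRun key rest).1)) :: aGroup (aTakeRun key rest).2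
termination_by l => l.length
decreasing_by
  simp only [List.length_cons]
  exact Nat.lt_succ_of_le (aTakeRun_len key rest)

def concatenate_repeating (kv_pairs : List (String × String)) : List (String × String) :=
  aGroup (PySem.List.sorted2 kv_pairs (fun p => p.1) (fun p => p.2))

-- ===== PORT B =====
-- groups.setdefault(key, []).append(value)  ≡  groups[key] = groups.get(key, []) + [value]
def bStep (d : PySem.Dict String (List String)) (p : String × String) : PySem.Dict String (List String) :=
  d.modify p.1 [] (· ++ [p.2])

def concatenate_repeating_alt (kv_pairs : List (String × String)) : List (String × String) :=
  let s := PySem.List.sorted2 kv_pairs (fun p => p.1) (fun p => p.2)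
  let groups := s.foldl bStep PySem.Dict.empty
  groups.items.map (fun p => (p.1, PySem.Str.join "#" p.2))

-- ===== PRECONDITION & SPEC =====
def Spec_concatenate_repeating (kv_pairs : List (String × String)) (out : List (String × String)) : Prop := out = concatenate_repeating_alt kv_pairs
instance (kv_pairs : List (String × String)) (out : List (String × String)) : Decidable (Spec_concatenate_repeating kv_pairs out) := by unfold Spec_concatenate_repeating; infer_instance

-- ===== CLAIM (what is proved, stated in full; the proofs are below) =====
def Claim_equal_concatenate_repeating : Prop := ∀ (kv_pairs : List (String × String)), Dom_concatenate_repeating kv_pairs → Spec_concatenate_repeating kv_pairs (concatenate_repeating kv_pairs)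

-- ===== LEMMAS AND PROOFS =====

lemma insertBy_lex_pairwise (x : String × String) :
    ∀ (ys : List (String × String)), ys.Pairwise (fun a b => a.1 ≤ b.1) →
    (PySem.List.insertBy
      (fun a b => decide (a.1 < b.1) || (!decide (b.1 < a.1) && decide (a.2 < b.2))) x ys).Pairwise
      (fun a b => a.1 ≤ b.1) := by
  intro ys
  induction ys with
  | nil => intro _; simp [PySem.List.insertBy]
  | cons y ys ih =>
    intro h
    rw [List.pairwise_cons] at h
    simp only [PySem.List.insertBy]
    split
    · next hb =>
      have hxy : x.1 ≤ y.1 := by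
        by_contra hcon
        have hlt : y.1 < x.1 := not_le.mp hcon
        simp [lt_asymm hlt, hlt] at hb
      refine List.Pairwise.cons ?_ (List.pairwise_cons.mpr h)
      intro z hz
      rcases List.mem_cons.mp hz with rfl | hz
      · exact hxy
      · exact le_trans hxy (h.1 z hz)
    · next hb =>
      have hyx : y.1 ≤ x.1 := by
        by_contra hcon
        exact hb (by simp [not_le.mp hcon])
      refine List.Pairwise.cons ?_ (ih h.2)
      intro z hz
      rcases (PySem.List.insertBy_mem_iff _ x z ys).mp hz with rfl | hz
      · exact hyx
      · exact h.1 z hz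

lemma foldl_insertBy_pairwise : ∀ (xs acc : List (String × String)),
    acc.Pairwise (fun a b => a.1 ≤ b.1) →
    (xs.foldl (fun acc x => PySem.List.insertBy
      (fun a b => decide (a.1 < b.1) || (!decide (b.1 < a.1) && decide (a.2 < b.2))) x acc) acc).Pairwise
      (fun a b => a.1 ≤ b.1) := by
  intro xs
  induction xs with
  | nil => intro acc h; simpa using h
  | cons x xs ih => intro acc h; rw [List.foldl_cons]; exact ih _ (insertBy_lex_pairwise x acc h)

lemma sorted2_pairwise_key (xs : List (String × String)) :
    (PySem.List.sorted2 xs (fun p => p.1) (fun p => p.2)).Pairwise (fun a b => a.1 ≤ b.1) := by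
  have h : PySem.List.sorted2 xs (fun p => p.1) (fun p => p.2)
      = xs.foldl (fun acc x => PySem.List.insertBy
          (fun a b => decide (a.1 < b.1) || (!decide (b.1 < a.1) && decide (a.2 < b.2))) x acc) [] := rfl
  rw [h]
  exact foldl_insertBy_pairwise xs [] (by simp)

lemma dropWhile_head_false {α : Type} (p : α → Bool) : ∀ (l : List α) (x : α) (t : List α),
    l.dropWhile p = x :: t → p x = false := by
  intro l
  induction l with
  | nil => intro x t h; simp [List.dropWhile] at h
  | cons a l ih =>
    intro x t h
    rw [List.dropWhile_cons] at h
    by_cases hpa : p a = true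
    · rw [if_pos hpa] at h; exact ih x t h
    · rw [if_neg hpa] at h
      injection h with h1 _
      subst h1
      simpa using hpa

lemma aTakeRun_eq (key : String) : ∀ (l : List (String × String)),
    aTakeRun key l = ((l.takeWhile (fun p => p.1 == key)).map (fun p => p.2),
                      l.dropWhile (fun p => p.1 == key)) := by
  intro l
  induction l with
  | nil => simp [aTakeRun]
  | cons p rest ih =>
    obtain ⟨pk, pv⟩ := p
    by_cases h : key = pk
    · subst h
      simp [aTakeRun, ih]
    · have h1 : (key == pk) = false := beq_eq_false_iff_ne.mpr h
      have h2 : (pk == key) = false := beq_eq_false_iff_ne.mpr (Ne.symm h)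
      simp [aTakeRun, h1, h2]

lemma fold_run (k : String) : ∀ (run : List (String × String)), (∀ p ∈ run, p.1 = k) →
    ∀ a : List String,
    run.foldl bStep ⟨[(k, a)]⟩ = ⟨[(k, a ++ run.map (fun p => p.2))]⟩ := by
  intro run
  induction run with
  | nil => intro _ a; simp
  | cons p rest ih =>
    intro hrun a
    obtain ⟨pk, pv⟩ := p
    have hk : pk = k := hrun (pk, pv) (by simp)
    subst hk
    rw [List.foldl_cons]
    have hstep : bStep ⟨[(pk, a)]⟩ (pk, pv) = ⟨[(pk, a ++ [pv])]⟩ := by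
      simp [bStep, PySem.Dict.modify, PySem.Dict.insert, PySem.Dict.contains,
            PySem.Dict.getD, PySem.Dict.get?]
    rw [hstep, ih (fun q hq => hrun q (List.mem_cons_of_mem _ hq)) (a ++ [pv])]
    simp

lemma fold_fresh (k : String) (V : List String) :
    ∀ (l : List (String × String)), (∀ p ∈ l, p.1 ≠ k) →
    ∀ (ds : List (String × List String)),
    (l.foldl bStep ⟨(k, V) :: ds⟩).items = (k, V) :: (l.foldl bStep ⟨ds⟩).items := by
  intro l
  induction l with
  | nil => intro _ ds; simp
  | cons p rest ih =>
    intro hl ds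
    obtain ⟨pk, pv⟩ := p
    have hpk : pk ≠ k := hl (pk, pv) (by simp)
    have h1 : (pk == k) = false := beq_eq_false_iff_ne.mpr hpk
    have h2 : (k == pk) = false := beq_eq_false_iff_ne.mpr (Ne.symm hpk)
    rw [List.foldl_cons, List.foldl_cons]
    have hstep : bStep ⟨(k, V) :: ds⟩ (pk, pv) = ⟨(k, V) :: (bStep ⟨ds⟩ (pk, pv)).items⟩ := by
      by_cases hc : (ds.any fun q => q.1 == pk) = true
      · simp [bStep, PySem.Dict.modify, PySem.Dict.insert, PySem.Dict.contains,
              PySem.Dict.getD, PySem.Dict.get?, hc, h2, Ne.symm hpk]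
      · simp [bStep, PySem.Dict.modify, PySem.Dict.insert, PySem.Dict.contains,
              PySem.Dict.getD, PySem.Dict.get?, hc, h2]
    rw [hstep]
    exact ih (fun q hq => hl q (List.mem_cons_of_mem _ hq)) (bStep ⟨ds⟩ (pk, pv)).items

lemma fold_rest (k : String) (a : List String) (l : List (String × String))
    (hall : ∀ p ∈ l.dropWhile (fun p => p.1 == k), p.1 ≠ k) :
    (l.foldl bStep ⟨[(k, a)]⟩).items
      = (k, a ++ (l.takeWhile (fun p => p.1 == k)).map (fun p => p.2))
        :: ((l.dropWhile (fun p => p.1 == k)).foldl bStep ⟨[]⟩).items := by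
  conv_lhs => rw [← List.takeWhile_append_dropWhile (p := fun p => p.1 == k) (l := l)]
  rw [List.foldl_append,
      fold_run k _ (fun p hp => by simpa using List.mem_takeWhile_imp hp) a,
      fold_fresh k _ _ hall []]

lemma dict_fold_eq_aGroup : ∀ (n : Nat) (xs : List (String × String)), xs.length ≤ n →
    xs.Pairwise (fun a b => a.1 ≤ b.1) →
    ((xs.foldl bStep PySem.Dict.empty).items.map (fun p => (p.1, PySem.Str.join "#" p.2)))
      = aGroup xs := by
  intro n
  induction n with
  | zero =>
    intro xs hlen _
    cases xs with
    | nil => simp [aGroup, PySem.Dict.empty]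
    | cons hd rest => exact absurd hlen (by simp)
  | succ n ih =>
    intro xs hlen hpw
    cases xs with
    | nil => simp [aGroup, PySem.Dict.empty]
    | cons hd rest =>
      obtain ⟨k, v⟩ := hd
      rw [List.pairwise_cons] at hpw
      obtain ⟨h1, h2⟩ := hpw
      have hsub : (rest.dropWhile (fun p => p.1 == k)).Sublist rest := List.dropWhile_sublist _
      have hrpw : (rest.dropWhile (fun p => p.1 == k)).Pairwise (fun a b => a.1 ≤ b.1) :=
        List.Pairwise.sublist hsub h2
      have hrk : ∀ p ∈ rest.dropWhile (fun p => p.1 == k), p.1 ≠ k := by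
        intro p hp
        rcases hcr : rest.dropWhile (fun p => p.1 == k) with _ | ⟨q, t⟩
        · rw [hcr] at hp; simp at hp
        · rw [hcr] at hp
          have hq : (q.1 == k) = false := dropWhile_head_false (fun p => p.1 == k) rest q t hcr
          have hqk : q.1 ≠ k := by simpa using hq
          have hqrest : q ∈ rest := by
            refine hsub.subset ?_
            rw [hcr]; exact List.mem_cons_self
          have hkq : k ≤ q.1 := h1 q hqrest
          rcases List.mem_cons.mp hp with rfl | hpt
          · exact hqk
          · have hqp : q.1 ≤ p.1 := (List.pairwise_cons.mp (hcr ▸ hrpw)).1 p hpt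
            intro hpk
            exact hqk (le_antisymm (hpk ▸ hqp) hkq)
      have hlen' : (rest.dropWhile (fun p => p.1 == k)).length ≤ n :=
        le_trans (List.length_dropWhile_le _ _) (Nat.le_of_succ_le_succ (by simpa using hlen))
      have hIH := ih _ hlen' hrpw
      have hg : aGroup ((k, v) :: rest)
          = (k, PySem.Str.join "#" (v :: (rest.takeWhile (fun p => p.1 == k)).map (fun p => p.2)))
            :: aGroup (rest.dropWhile (fun p => p.1 == k)) := by
        simp [aGroup, aTakeRun_eq]
      rw [hg, List.foldl_cons,
          (show bStep PySem.Dict.empty (k, v) = ⟨[(k, [v])]⟩ from rfl),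
          (show (PySem.Dict.empty : PySem.Dict String (List String)) = ⟨[]⟩ from rfl) ] at *
      rw [fold_rest k [v] rest hrk, List.map_cons, hIH]
      simp

-- ===== VERDICT (by name: the statement is the Claim_ definition above) =====
theorem concatenate_repeating_spec : Claim_equal_concatenate_repeating := by
  intro kv _
  show concatenate_repeating kv = concatenate_repeating_alt kv
  unfold concatenate_repeating concatenate_repeating_alt
  have hpw := sorted2_pairwise_key kv
  exact (dict_fold_eq_aGroup
    (PySem.List.sorted2 kv (fun p => p.1) (fun p => p.2)).length _ le_rfl hpw).symm
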